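-- pv_equiv track=rewrite | github.com/claudiotorrinha/WhatsAppChatParser | wcp/transcript_quality.py | _max_consecutive_token_run
-- ===== SOURCE A (Python) =====
-- def _max_consecutive_token_run(tokens: list[str]) -> int:
--     if not tokens:
--         return 0
--     best = 1
--     run = 1
--     for i in range(1, len(tokens)):
--         if tokens[i] == tokens[i - 1]:
--             run += 1
--             if run > best:
--                 best = run
--         else:
--             run = 1
--     return best
-- ===== SOURCE B (Python) =====
-- def _max_consecutive_token_run(tokens: list[str]) -> int:
--     n = len(tokens)
--     cuts = [0] + [i for i in range(1, n) if tokens[i] != tokens[i - 1]] + [n]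
--     return max(b - a for a, b in zip(cuts, cuts[1:]))
-- ===== Notes on version B (the rewrite author's own statement) =====
-- stated objective: alternative
-- what changed: B first builds the list of run-boundary indices (0, every position where adjacent tokens differ, n) and then returns the maximum gap between consecutive boundaries, instead of A's fused best/run counter scan.
import Mathlib
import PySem

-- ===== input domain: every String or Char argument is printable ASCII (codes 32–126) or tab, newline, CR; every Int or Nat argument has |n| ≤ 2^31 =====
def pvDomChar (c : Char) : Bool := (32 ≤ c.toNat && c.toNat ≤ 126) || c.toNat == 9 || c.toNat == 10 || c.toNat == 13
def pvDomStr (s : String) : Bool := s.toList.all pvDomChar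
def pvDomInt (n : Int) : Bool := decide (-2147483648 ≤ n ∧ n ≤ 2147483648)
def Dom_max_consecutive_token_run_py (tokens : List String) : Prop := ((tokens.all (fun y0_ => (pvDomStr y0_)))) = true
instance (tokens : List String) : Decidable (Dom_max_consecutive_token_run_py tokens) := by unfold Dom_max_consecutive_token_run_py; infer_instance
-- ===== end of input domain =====

-- B replaces A's fused best/run counter scan by a staged algorithm: build the list of run-boundary indices, then take the maximum gap between consecutive boundaries (alternative algorithm, same cost).

-- ===== PORT A =====
def max_consecutive_token_run_py (tokens : List String) : Int :=
  if tokens = [] then 0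
  else
    ((PySem.List.pyRange 1 (tokens.length : Int) 1).foldl
      (fun (s : Int × Int) i =>
        if PySem.List.pyGetD tokens i "" = PySem.List.pyGetD tokens (i - 1) "" then
          ((if s.2 + 1 > s.1 then s.2 + 1 else s.1), s.2 + 1)
        else (s.1, 1)) ((1 : Int), (1 : Int))).1

-- ===== PORT B =====
-- cuts = [0] + [i for i in range(1, n) if tokens[i] != tokens[i-1]] + [n]
def pvCuts (tokens : List String) : List Int :=
  0 :: (((PySem.List.pyRange 1 (tokens.length : Int) 1).filter
      (fun i => !(PySem.List.pyGetD tokens i "" == PySem.List.pyGetD tokens (i - 1) ""))) ++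
    [(tokens.length : Int)])

-- max(b - a for a, b in zip(cuts, cuts[1:])); the zipped list is never empty
-- (cuts always has ≥ 2 entries), so Python's max never raises; getD 0 is unreachable.
def max_consecutive_token_run_py_alt (tokens : List String) : Int :=
  ((PySem.List.max?
      (((pvCuts tokens).zip (pvCuts tokens).tail).map (fun p => p.2 - p.1))
      (fun y => y)).getD 0)

-- ===== PRECONDITION & SPEC =====
def Spec_max_consecutive_token_run_py (tokens : List String) (out : Int) : Prop := out = max_consecutive_token_run_py_alt tokens
instance (tokens : List String) (out : Int) : Decidable (Spec_max_consecutive_token_run_py tokens out) := by unfold Spec_max_consecutive_token_run_py; infer_instance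

-- ===== CLAIM (what is proved, stated in full; the proofs are below) =====
def Claim_equal_max_consecutive_token_run_py : Prop := ∀ (tokens : List String), Dom_max_consecutive_token_run_py tokens → Spec_max_consecutive_token_run_py tokens (max_consecutive_token_run_py tokens)

-- ===== LEMMAS AND PROOFS =====

-- the successive differences of a list of cut positions
def pvDiffs (cuts : List Int) : List Int := (cuts.zip cuts.tail).map (fun p => p.2 - p.1)

theorem pvDiffs_cons2 (a b : Int) (r : List Int) :
    pvDiffs (a :: b :: r) = (b - a) :: pvDiffs (b :: r) := rfl

-- the run lengths of the maximal blocks of consecutive equal tokens (count n already in the open run)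
def pvRunLens (prev : String) (n : Int) : List String → List Int
  | [] => [n]
  | x :: xs => if x = prev then pvRunLens prev (n + 1) xs else n :: pvRunLens x 1 xs

-- structural reference for A's indexed loop: state (best, run), prev = previous token
def pvRef : List String → String → Int × Int → Int × Int
  | [], _, s => s
  | y :: ys, prev, s =>
      if y = prev then
        pvRef ys y ((if s.2 + 1 > s.1 then s.2 + 1 else s.1), s.2 + 1)
      else pvRef ys y (s.1, 1)

-- A's fold over range(a+1, len) equals pvRef on the dropped suffix
theorem pvFoldA (tokens : List String) : ∀ (n a : Nat) (s : Int × Int),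
    tokens.length - (a + 1) = n →
    (PySem.List.pyRange ((a : Int) + 1) (tokens.length : Int) 1).foldl
      (fun (s : Int × Int) i =>
        if PySem.List.pyGetD tokens i "" = PySem.List.pyGetD tokens (i - 1) "" then
          ((if s.2 + 1 > s.1 then s.2 + 1 else s.1), s.2 + 1)
        else (s.1, 1)) s
    = pvRef (tokens.drop (a + 1)) (tokens.getD a "") s := by
  intro n
  induction n with
  | zero =>
      intro a s h
      have hle : tokens.length ≤ a + 1 := by omega
      rw [List.drop_eq_nil_of_le hle]
      rw [PySem.List.pyRange_one_eq_nil (by exact_mod_cast hle)]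
      rfl
  | succ m ih =>
      intro a s h
      have hlt : a + 1 < tokens.length := by omega
      have hcons : PySem.List.pyRange ((a : Int) + 1) (tokens.length : Int) 1
          = ((a : Int) + 1) :: PySem.List.pyRange ((a : Int) + 1 + 1) (tokens.length : Int) 1 := by
        exact PySem.List.pyRange_one_cons (by exact_mod_cast hlt)
      rw [hcons]
      simp only [List.foldl_cons]
      have hg1 : PySem.List.pyGetD tokens ((a : Int) + 1) "" = tokens.getD (a + 1) "" := by
        have : ((a : Int) + 1) = ((a + 1 : Nat) : Int) := by push_cast; ring
        rw [this, PySem.List.pyGetD_natCast]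
      have hg0 : PySem.List.pyGetD tokens ((a : Int) + 1 - 1) "" = tokens.getD a "" := by
        have : ((a : Int) + 1 - 1) = ((a : Nat) : Int) := by ring
        rw [this, PySem.List.pyGetD_natCast]
      have hdrop : tokens.drop (a + 1) = tokens[a + 1] :: tokens.drop (a + 2) := by
        exact List.drop_eq_getElem_cons hlt
      have hgetD : tokens.getD (a + 1) "" = tokens[a + 1] := by
        simp [List.getD_eq_getElem?_getD, List.getElem?_eq_getElem hlt]
      have harith : ((a : Int) + 1 + 1) = (((a + 1 : Nat) : Int) + 1) := by push_cast; ring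
      have htail := ih (a + 1)
        (if PySem.List.pyGetD tokens ((a : Int) + 1) "" = PySem.List.pyGetD tokens ((a : Int) + 1 - 1) "" then
          ((if s.2 + 1 > s.1 then s.2 + 1 else s.1), s.2 + 1) else (s.1, 1)) (by omega)
      rw [harith, htail, hdrop, hg1, hg0, hgetD]
      by_cases hc : tokens[a + 1] = tokens[a]?.getD ""
      · simp [pvRef, List.getD, hc]
      · simp [pvRef, List.getD, hc]

-- the successive differences of B's cut positions are exactly the run lengths
theorem pvDiffsCuts (tokens : List String) : ∀ (m a : Nat) (s : Int),
    tokens.length - (a + 1) = m → a < tokens.length →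
    pvDiffs (s :: (((PySem.List.pyRange ((a : Int) + 1) (tokens.length : Int) 1).filter
        (fun i => !(PySem.List.pyGetD tokens i "" == PySem.List.pyGetD tokens (i - 1) ""))) ++
      [(tokens.length : Int)]))
    = pvRunLens (tokens.getD a "") ((a : Int) + 1 - s) (tokens.drop (a + 1)) := by
  intro m
  induction m with
  | zero =>
      intro a s h ha
      have heq : a + 1 = tokens.length := by omega
      rw [PySem.List.pyRange_one_eq_nil (by exact_mod_cast heq.ge)]
      rw [List.drop_eq_nil_of_le heq.ge]
      simp only [List.filter_nil, List.nil_append, pvDiffs_cons2, pvRunLens]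
      have : ((tokens.length : Int)) = ((a : Int) + 1) := by
        rw [← heq]; push_cast; ring
      rw [this]
      rfl
  | succ m ih =>
      intro a s h ha
      have hlt : a + 1 < tokens.length := by omega
      have hcons : PySem.List.pyRange ((a : Int) + 1) (tokens.length : Int) 1
          = ((a : Int) + 1) :: PySem.List.pyRange ((a : Int) + 1 + 1) (tokens.length : Int) 1 := by
        exact PySem.List.pyRange_one_cons (by exact_mod_cast hlt)
      have hg1 : PySem.List.pyGetD tokens ((a : Int) + 1) "" = tokens.getD (a + 1) "" := by
        have : ((a : Int) + 1) = ((a + 1 : Nat) : Int) := by push_cast; ring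
        rw [this, PySem.List.pyGetD_natCast]
      have hg0 : PySem.List.pyGetD tokens ((a : Int) + 1 - 1) "" = tokens.getD a "" := by
        have : ((a : Int) + 1 - 1) = ((a : Nat) : Int) := by ring
        rw [this, PySem.List.pyGetD_natCast]
      have hdrop : tokens.drop (a + 1) = tokens[a + 1] :: tokens.drop (a + 2) := by
        exact List.drop_eq_getElem_cons hlt
      have hgetD1 : tokens.getD (a + 1) "" = tokens[a + 1] := by
        simp [List.getD_eq_getElem?_getD, List.getElem?_eq_getElem hlt]
      have harith : ((a : Int) + 1 + 1) = (((a + 1 : Nat) : Int) + 1) := by push_cast; ring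
      rw [hcons]
      by_cases hc : tokens[a + 1] = tokens.getD a ""
      · -- equal adjacent tokens: a+1 is not a cut
        have hcond : (!(PySem.List.pyGetD tokens ((a : Int) + 1) "" == PySem.List.pyGetD tokens ((a : Int) + 1 - 1) "")) = false := by
          rw [hg1, hg0, hgetD1, hc]; simp
        simp only [List.filter_cons]
        rw [hcond, if_neg Bool.false_ne_true, harith,
          ih (a + 1) s (by omega) (by omega), hdrop]
        rw [show tokens.getD (a + 1) "" = tokens.getD a "" from hgetD1.trans hc]
        rw [show (((a + 1 : Nat) : Int) + 1 - s) = ((a : Int) + 1 - s) + 1 by push_cast; ring]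
        rw [show a + 1 + 1 = a + 2 from rfl]
        simp only [pvRunLens, if_pos hc]
      · -- differing adjacent tokens: a+1 is a cut
        have hcond : (!(PySem.List.pyGetD tokens ((a : Int) + 1) "" == PySem.List.pyGetD tokens ((a : Int) + 1 - 1) "")) = true := by
          rw [hg1, hg0, hgetD1]
          simpa using hc
        simp only [List.filter_cons]
        rw [hcond, if_pos rfl, List.cons_append, pvDiffs_cons2, harith,
          ih (a + 1) ((a : Int) + 1) (by omega) (by omega), hdrop]
        simp only [pvRunLens, if_neg hc]
        rw [show (((a + 1 : Nat) : Int) + 1 - ((a : Int) + 1)) = (1 : Int) by push_cast; ring]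
        rw [hgetD1, show a + 1 + 1 = a + 2 from rfl]

-- foldl max pulls a max out of the seed
theorem pvFoldlMaxComm : ∀ (L : List Int) (b c : Int), L.foldl max (max b c) = max (L.foldl max b) c := by
  intro L
  induction L with
  | nil => intro b c; rfl
  | cons x t ih =>
      intro b c
      simp only [List.foldl_cons]
      rw [max_right_comm b c x, ih]

-- the current count is a lower bound on any fold of the run lengths
theorem pvCountLe : ∀ (ys : List String) (prev : String) (c b : Int), c ≤ (pvRunLens prev c ys).foldl max b := by
  intro ys
  induction ys with
  | nil => intro prev c b; simp [pvRunLens]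
  | cons y t ih =>
      intro prev c b
      by_cases h : y = prev
      · simp only [pvRunLens, if_pos h]
        exact le_trans (by omega) (ih prev (c + 1) b)
      · simp only [pvRunLens, if_neg h, List.foldl_cons]
        exact le_trans (le_max_right b c) (PySem.List.le_foldl_max _ _).1

-- pvRef's best equals a max-fold over the run lengths
theorem pvRefEqFold : ∀ (ys : List String) (prev : String) (cnt best : Int),
    1 ≤ cnt → cnt ≤ best →
    (pvRef ys prev (best, cnt)).1 = (pvRunLens prev cnt ys).foldl max best := by
  intro ys
  induction ys with
  | nil => intro prev cnt best h1 h2; simp [pvRef, pvRunLens, max_eq_left h2]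
  | cons y t ih =>
      intro prev cnt best h1 h2
      by_cases h : y = prev
      · simp only [pvRef, pvRunLens, if_pos h]
        have hb : (if cnt + 1 > best then cnt + 1 else best) = max best (cnt + 1) := by
          split_ifs with hh <;> omega
        rw [hb, ih y (cnt + 1) (max best (cnt + 1)) (by omega) (le_max_right _ _)]
        subst h
        rw [pvFoldlMaxComm]
        exact max_eq_left (pvCountLe t y (cnt + 1) best)
      · simp only [pvRef, pvRunLens, if_neg h, List.foldl_cons]
        rw [ih y 1 best (le_refl 1) (le_trans h1 h2), pvFoldlMaxComm]
        exact (max_eq_left (le_trans h2 (PySem.List.le_foldl_max _ _).1)).symm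

-- run lengths list is nonempty, head bounded below by the running count
theorem pvRunLensCons : ∀ (ys : List String) (prev : String) (c : Int),
    ∃ h t, pvRunLens prev c ys = h :: t ∧ c ≤ h := by
  intro ys
  induction ys with
  | nil => intro prev c; exact ⟨c, [], rfl, le_refl c⟩
  | cons y t ih =>
      intro prev c
      by_cases h : y = prev
      · obtain ⟨h0, t0, he, hle⟩ := ih prev (c + 1)
        exact ⟨h0, t0, by simp [pvRunLens, h, he], by omega⟩
      · exact ⟨c, pvRunLens y 1 t, by simp [pvRunLens, h], le_refl c⟩

-- ===== VERDICT (by name: the statement is the Claim_ definition above) =====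
theorem max_consecutive_token_run_py_spec : Claim_equal_max_consecutive_token_run_py := by
  intro tokens _
  unfold Spec_max_consecutive_token_run_py
  match tokens with
  | [] => rfl
  | x :: xs =>
      unfold max_consecutive_token_run_py max_consecutive_token_run_py_alt pvCuts
      simp only [if_neg (List.cons_ne_nil x xs)]
      have h0 : ((0 : Nat) : Int) + 1 = 1 := by norm_num
      -- A side
      have hA := pvFoldA (x :: xs) ((x :: xs).length - 1) 0 (1, 1) rfl
      rw [h0] at hA
      have hd : List.drop (0 + 1) (x :: xs) = xs := rfl
      have hg : (x :: xs).getD 0 "" = x := rfl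
      rw [hA, hd, hg]
      -- B side: diffs of cuts = run lengths
      have hdef : ∀ c : List Int, (c.zip c.tail).map (fun p => p.2 - p.1) = pvDiffs c :=
        fun c => rfl
      rw [hdef]
      have hB := pvDiffsCuts (x :: xs) ((x :: xs).length - 1) 0 0 rfl (by simp)
      rw [h0] at hB
      rw [sub_zero, hd, hg] at hB
      rw [hB]
      obtain ⟨h, t, he, hle⟩ := pvRunLensCons xs x 1
      rw [pvRefEqFold xs x 1 1 (le_refl 1) (le_refl 1), he, PySem.List.max?_id_cons]
      simp only [Option.getD_some, List.foldl_cons]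
      rw [max_eq_right hle]
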